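-- pv_equiv track=rewrite | github.com/amandaclare/lyndon-factors | enhanced_factors.py | exp_parikh_vector
-- ===== SOURCE A (Python) =====
-- def exp_parikh_vector(s):
--     """Find the list of exponent parikh vectors, in order of first occurrence of chars.
--     return a list of pairs: unique char, corresponding exponent vector"""
--     uniques = []
--     counts = {}
--     last_seen = None
--     new_count = True
--     for c in s:
--         if c != last_seen:
--             new_count = True
--             last_seen = c
--         else:
--             new_count = False
--         if c not in counts:
--             uniques.append(c)
--             counts[c] = []
--         if new_count:
--             counts[c].append(1)
--         else:
--             counts[c][-1] += 1
--     eps = [(c,''.join(map(str, counts[c]))) for c in uniques]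
--     return eps
-- ===== SOURCE B (Python) =====
-- def exp_parikh_vector(s):
--     """Find the list of exponent parikh vectors, in order of first occurrence of chars.
--     return a list of pairs: unique char, corresponding exponent vector"""
--     # Pass 1: split s into maximal runs (char, run length) with an index scan.
--     runs = []
--     i = 0
--     n = len(s)
--     while i < n:
--         j = i + 1
--         while j < n and s[j] == s[i]:
--             j += 1
--         runs.append((s[i], j - i))
--         i = j
--     # Pass 2: group run lengths per character, in first-occurrence order.
--     uniques = []
--     counts = {}
--     for c, k in runs:
--         if c not in counts:
--             uniques.append(c)
--             counts[c] = []
--         counts[c].append(k)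
--     return [(c, ''.join(map(str, counts[c]))) for c in uniques]
-- ===== Notes on version B (the rewrite author's own statement) =====
-- stated objective: alternative
-- what changed: Replaces A's per-character last_seen/new_count run-boundary state machine with a two-pass scheme: an index scan first splits the string into maximal (char, run-length) runs, then a second pass groups the run lengths per character in first-occurrence order.
import Mathlib
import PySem

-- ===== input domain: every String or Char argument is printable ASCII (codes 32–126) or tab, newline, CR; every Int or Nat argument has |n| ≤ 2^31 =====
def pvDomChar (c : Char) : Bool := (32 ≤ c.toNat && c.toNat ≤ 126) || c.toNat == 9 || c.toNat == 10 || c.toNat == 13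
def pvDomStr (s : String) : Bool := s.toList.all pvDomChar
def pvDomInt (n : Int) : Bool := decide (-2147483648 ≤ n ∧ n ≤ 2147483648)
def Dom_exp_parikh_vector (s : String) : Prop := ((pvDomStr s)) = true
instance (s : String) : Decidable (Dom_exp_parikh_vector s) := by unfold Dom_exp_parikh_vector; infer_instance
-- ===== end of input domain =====

-- B replaces A's last_seen/new_count run-boundary state machine by a first pass that
-- splits the string into maximal runs and a second pass grouping run lengths per char
-- (objective: alternative decomposition, same O(n) cost).

-- ===== PORT A =====
-- loop body of A: state = (uniques, counts, last_seen)
def pvStepA (st : List Char × PySem.Dict Char (List Int) × Option Char) (c : Char) :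
    List Char × PySem.Dict Char (List Int) × Option Char :=
  -- if c != last_seen: new_count = True; last_seen = c  else: new_count = False
  let nc_ls : Bool × Option Char :=
    if some c ≠ st.2.2 then (true, some c) else (false, st.2.2)
  -- if c not in counts: uniques.append(c); counts[c] = []
  let uc : List Char × PySem.Dict Char (List Int) :=
    if st.2.1.contains c then (st.1, st.2.1) else (st.1 ++ [c], st.2.1.insert c [])
  -- if new_count: counts[c].append(1)  else: counts[c][-1] += 1
  let counts2 :=
    if nc_ls.1 then uc.2.modify c [] (fun l => l ++ [(1 : Int)])
    else uc.2.modify c [] (fun l => PySem.List.pySetD l (-1) (PySem.List.pyGetD l (-1) 0 + 1))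
  (uc.1, counts2, nc_ls.2)

def exp_parikh_vector (s : String) : List (String × String) :=
  let st := s.toList.foldl pvStepA ([], PySem.Dict.empty, none)
  st.1.map (fun c => (String.singleton c, PySem.Str.join "" ((st.2.1.getD c []).map PySem.Int.toStr)))

-- ===== PORT B =====
-- pass 1 of B: the outer while loop with the inner run-end scan (j = end of the run of s[i])
def pvRuns : List Char → List (Char × Nat)
  | [] => []
  | c :: rest =>
      (c, (rest.takeWhile (· == c)).length + 1) :: pvRuns (rest.dropWhile (· == c))
  termination_by l => l.length
  decreasing_by
    simp only [List.length_cons]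
    exact Nat.lt_succ_of_le (List.length_dropWhile_le _ _)

-- pass 2 of B: loop body over runs, state = (uniques, counts)
def pvStepB (st : List Char × PySem.Dict Char (List Int)) (r : Char × Nat) :
    List Char × PySem.Dict Char (List Int) :=
  let uc := if st.2.contains r.1 then st else (st.1 ++ [r.1], st.2.insert r.1 [])
  (uc.1, uc.2.modify r.1 [] (fun l => l ++ [(r.2 : Int)]))

def exp_parikh_vector_alt (s : String) : List (String × String) :=
  let st := (pvRuns s.toList).foldl pvStepB ([], PySem.Dict.empty)
  st.1.map (fun c => (String.singleton c, PySem.Str.join "" ((st.2.getD c []).map PySem.Int.toStr)))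

-- ===== PRECONDITION & SPEC =====
def Spec_exp_parikh_vector (s : String) (out : List (String × String)) : Prop := out = exp_parikh_vector_alt s
instance (s : String) (out : List (String × String)) : Decidable (Spec_exp_parikh_vector s out) := by unfold Spec_exp_parikh_vector; infer_instance

-- ===== CLAIM (what is proved, stated in full; the proofs are below) =====
def Claim_equal_exp_parikh_vector : Prop := ∀ (s : String), Dom_exp_parikh_vector s → Spec_exp_parikh_vector s (exp_parikh_vector s)

-- ===== LEMMAS AND PROOFS =====

-- counts[c][-1] += 1 on a nonempty list appends nothing: it bumps the last element
theorem pvSetLast (v : List Int) (j x : Int) :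
    PySem.List.pySetD (v ++ [j]) (-1) x = v ++ [x] := by
  simp [PySem.List.pySetD, PySem.List.pySet?, PySem.List.pyIdx?]

-- A's steps on the tail of a run (last_seen = c) just bump the last exponent of counts[c]
theorem pvTailA (c : Char) (pre : List Char) (hp : ∀ x ∈ pre, x = c) :
    ∀ (u : List Char) (d : PySem.Dict Char (List Int)) (v : List Int) (j : Int),
      pre.foldl pvStepA (u, d.insert c (v ++ [j]), some c)
        = (u, d.insert c (v ++ [j + (pre.length : Int)]), some c) := by
  induction pre with
  | nil => intro u d v j; simp
  | cons x pre ih =>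
      intro u d v j
      have hx : x = c := hp x (by simp)
      subst hx
      have hp' : ∀ y ∈ pre, y = x := fun y hy => hp y (by simp [hy])
      simp only [List.foldl_cons]
      have hstep : pvStepA (u, d.insert x (v ++ [j]), some x) x
          = (u, d.insert x (v ++ [j + 1]), some x) := by
        simp only [pvStepA, ne_eq, not_true_eq_false, if_false,
          PySem.Dict.contains_insert_self, if_true, PySem.Dict.modify,
          PySem.Dict.getD_insert_self, PySem.Dict.insert_insert_self,
          PySem.List.pyGetD_neg_one_append_singleton, pvSetLast]
        simp
      rw [hstep, ih hp' u d v (j + 1)]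
      have : j + 1 + (pre.length : Int) = j + ((pre.length + 1 : Nat) : Int) := by push_cast; ring
      simp [this]

-- processing one maximal run with A = one pvStepB step of B
theorem pvRunA (c : Char) (pre : List Char) (hp : ∀ x ∈ pre, x = c)
    (u : List Char) (d : PySem.Dict Char (List Int)) (last : Option Char)
    (hlast : some c ≠ last) :
    (c :: pre).foldl pvStepA (u, d, last)
      = ((pvStepB (u, d) (c, pre.length + 1)).1, (pvStepB (u, d) (c, pre.length + 1)).2, some c) := by
  simp only [List.foldl_cons]
  by_cases hc : d.contains c
  · have hstep : pvStepA (u, d, last) c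
        = (u, d.insert c (d.getD c [] ++ [(1 : Int)]), some c) := by
      simp [pvStepA, hlast, hc, PySem.Dict.modify]
    rw [hstep]
    have := pvTailA c pre hp u d (d.getD c []) 1
    rw [this]
    simp only [pvStepB, hc, if_true, PySem.Dict.modify]
    have : (1 : Int) + (pre.length : Int) = ((pre.length + 1 : Nat) : Int) := by push_cast; ring
    simp [this]
  · have hstep : pvStepA (u, d, last) c
        = (u ++ [c], (d.insert c []).insert c (([] : List Int) ++ [(1 : Int)]), some c) := by
      simp [pvStepA, hlast, hc, PySem.Dict.modify]
    rw [hstep, pvTailA c pre hp (u ++ [c]) (d.insert c []) [] 1]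
    simp only [pvStepB, hc, if_false, PySem.Dict.modify, PySem.Dict.getD_insert_self,
      Bool.false_eq_true]
    have : (1 : Int) + (pre.length : Int) = ((pre.length + 1 : Nat) : Int) := by push_cast; ring
    simp [this]

-- main loop correspondence: A's char loop = B's run loop, on uniques and counts
theorem pvMain (l : List Char) :
    ∀ (u : List Char) (d : PySem.Dict Char (List Int)) (last : Option Char),
      (∀ c, last = some c → l.head? ≠ some c) →
      (l.foldl pvStepA (u, d, last)).1 = ((pvRuns l).foldl pvStepB (u, d)).1 ∧
      (l.foldl pvStepA (u, d, last)).2.1 = ((pvRuns l).foldl pvStepB (u, d)).2 := by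
  induction l using pvRuns.induct with
  | case1 => intro u d last _; simp [pvRuns]
  | case2 c rest ih =>
      intro u d last hlast
      have hdecomp : c :: rest = (c :: rest.takeWhile (· == c)) ++ rest.dropWhile (· == c) := by
        simp [List.takeWhile_append_dropWhile]
      have hpre : ∀ x ∈ rest.takeWhile (· == c), x = c := by
        intro x hx
        have := List.mem_takeWhile_imp hx
        simpa using this
      have hlast' : some c ≠ last := by
        intro h
        have := hlast c h.symm
        simp at this
      rw [hdecomp, List.foldl_append, pvRunA c _ hpre u d last hlast']
      have hne : (rest.dropWhile (· == c)).head? ≠ some c := by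
        intro h
        have hmem := List.head?_dropWhile_not (· == c) rest
        rw [h] at hmem
        simp at hmem
      have hhead : ∀ c', (some c : Option Char) = some c' → (rest.dropWhile (· == c)).head? ≠ some c' := by
        intro c' hc'
        obtain rfl : c = c' := Option.some.inj hc'
        exact hne
      have := ih ((pvStepB (u, d) (c, (rest.takeWhile (· == c)).length + 1)).1)
        ((pvStepB (u, d) (c, (rest.takeWhile (· == c)).length + 1)).2) (some c) hhead
      simpa [pvRuns] using this

-- ===== VERDICT (by name: the statement is the Claim_ definition above) =====
theorem exp_parikh_vector_spec : Claim_equal_exp_parikh_vector := by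
  intro s _
  unfold Spec_exp_parikh_vector exp_parikh_vector exp_parikh_vector_alt
  have h := pvMain s.toList [] PySem.Dict.empty none (by intro c h; cases h)
  simp only [h.1, h.2]
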